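-- pv_equiv track=rewrite | github.com/pb3437094-cloud/clawsearch | paper/paper_trader.py | _recently_closed_trade
-- ===== SOURCE A (Python) =====
-- from typing import Any
--
-- def _recently_closed_trade(
--     closed_trades: list[dict[str, Any]],
--     mint: str,
-- ) -> dict[str, Any] | None:
--     for trade in reversed(closed_trades):
--         if str(trade.get("mint") or "") == mint:
--             return trade
--     return None
-- ===== SOURCE B (Python) =====
-- # B: forward single pass with an accumulator (no early exit, no reversal);
-- # last forward match = first reverse match, so the same trade is returned.
-- def _recently_closed_trade(closed_trades, mint):
--     result = None
--     for trade in closed_trades: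
--         if str(trade.get("mint") or "") == mint:
--             result = trade
--     return result
-- ===== Notes on version B (the rewrite author's own statement) =====
-- stated objective: alternative
-- what changed: Replaced the reversed-iteration early-return scan with a forward single pass that keeps the last matching trade in an accumulator.
import Mathlib
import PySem

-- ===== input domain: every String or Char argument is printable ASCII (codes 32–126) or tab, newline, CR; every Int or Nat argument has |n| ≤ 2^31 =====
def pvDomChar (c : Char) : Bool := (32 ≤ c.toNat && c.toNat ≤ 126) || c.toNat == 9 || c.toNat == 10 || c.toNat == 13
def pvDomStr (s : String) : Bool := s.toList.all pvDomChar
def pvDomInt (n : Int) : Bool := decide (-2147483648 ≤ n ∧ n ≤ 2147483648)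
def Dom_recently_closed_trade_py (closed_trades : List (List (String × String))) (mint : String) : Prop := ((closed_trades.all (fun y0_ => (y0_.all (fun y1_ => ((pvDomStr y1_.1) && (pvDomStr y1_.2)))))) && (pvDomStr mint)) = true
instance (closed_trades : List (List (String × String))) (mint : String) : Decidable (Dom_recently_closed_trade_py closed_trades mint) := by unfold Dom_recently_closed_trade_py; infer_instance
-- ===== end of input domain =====

-- B replaces A's reversed early-return scan by a forward pass with a last-match accumulator (alternative decomposition).

-- ===== PORT A =====
-- str(trade.get("mint") or "") on a str-valued dict: missing key or "" both give "", so it is lookup with default "".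
def pvMintOf (trade : List (String × String)) : String :=
  match trade.find? (fun p => p.1 == "mint") with
  | some p => p.2
  | none => ""

-- 'for trade in reversed(closed_trades): if …: return trade' — first match over the reversed list.
def pvScanA (l : List (List (String × String))) (mint : String) : Option (List (String × String)) :=
  match l with
  | [] => none
  | t :: rest => if pvMintOf t == mint then some t else pvScanA rest mint

def recently_closed_trade_py (closed_trades : List (List (String × String))) (mint : String) : Option (List (String × String)) :=
  pvScanA closed_trades.reverse mint

-- ===== PORT B =====
-- forward loop, accumulator updated on every match
def recently_closed_trade_py_alt (closed_trades : List (List (String × String))) (mint : String) : Option (List (String × String)) :=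
  closed_trades.foldl (fun result trade => if pvMintOf trade == mint then some trade else result) none

-- ===== PRECONDITION & SPEC =====
def Spec_recently_closed_trade_py (closed_trades : List (List (String × String))) (mint : String) (out : Option (List (String × String))) : Prop := out = recently_closed_trade_py_alt closed_trades mint
instance (closed_trades : List (List (String × String))) (mint : String) (out : Option (List (String × String))) : Decidable (Spec_recently_closed_trade_py closed_trades mint out) := by unfold Spec_recently_closed_trade_py; infer_instance

-- ===== CLAIM (what is proved, stated in full; the proofs are below) =====
def Claim_equal_recently_closed_trade_py : Prop := ∀ (closed_trades : List (List (String × String))) (mint : String), Dom_recently_closed_trade_py closed_trades mint → Spec_recently_closed_trade_py closed_trades mint (recently_closed_trade_py closed_trades mint)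

-- ===== LEMMAS AND PROOFS =====
theorem pvScanA_append (a b : List (List (String × String))) (mint : String) :
    pvScanA (a ++ b) mint = match pvScanA a mint with
      | some t => some t
      | none => pvScanA b mint := by
  induction a with
  | nil => simp [pvScanA]
  | cons x xs ih =>
    simp only [List.cons_append, pvScanA]
    split_ifs with h
    · rfl
    · exact ih

theorem pvFoldB_eq (l : List (List (String × String))) (mint : String)
    (acc : Option (List (String × String))) :
    l.foldl (fun result trade => if pvMintOf trade == mint then some trade else result) acc
      = match pvScanA l.reverse mint with
        | some t => some t
        | none => acc := by
  induction l generalizing acc with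
  | nil => simp [pvScanA]
  | cons x xs ih =>
    simp only [List.foldl_cons, List.reverse_cons]
    rw [ih, pvScanA_append]
    cases h : pvScanA xs.reverse mint with
    | some t => rfl
    | none =>
      simp only [pvScanA]
      split_ifs with hx <;> rfl

-- ===== VERDICT (by name: the statement is the Claim_ definition above) =====
theorem recently_closed_trade_py_spec : Claim_equal_recently_closed_trade_py := by
  intro closed_trades mint _
  unfold Spec_recently_closed_trade_py recently_closed_trade_py recently_closed_trade_py_alt
  rw [pvFoldB_eq]
  cases pvScanA closed_trades.reverse mint <;> rfl
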